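-- pv_equiv track=rewrite | github.com/breno-gabriel/-Introduction-to-Programming---if669- | Functions/a_viagem_de_chihiro.py | refeicao
-- ===== SOURCE A (Python) =====
-- def refeicao(a):
--     if a % 10 == 0:
--         receita_gerada = 5
--         return receita_gerada
--     else:
--         receita_gerada = 0
--         while a % 10 != 0:
--             a += 1
--             receita_gerada += 1
--         return receita_gerada
-- ===== SOURCE B (Python) =====
-- def refeicao(a):
--     if a % 10 == 0:
--         return 5
--     return 10 - a % 10
-- ===== Notes on version B (the rewrite author's own statement) =====
-- stated objective: simpler
-- what changed: Replaced the counting while-loop with the closed-form expression 10 - a % 10 for the distance to the next multiple of 10.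
import Mathlib
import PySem

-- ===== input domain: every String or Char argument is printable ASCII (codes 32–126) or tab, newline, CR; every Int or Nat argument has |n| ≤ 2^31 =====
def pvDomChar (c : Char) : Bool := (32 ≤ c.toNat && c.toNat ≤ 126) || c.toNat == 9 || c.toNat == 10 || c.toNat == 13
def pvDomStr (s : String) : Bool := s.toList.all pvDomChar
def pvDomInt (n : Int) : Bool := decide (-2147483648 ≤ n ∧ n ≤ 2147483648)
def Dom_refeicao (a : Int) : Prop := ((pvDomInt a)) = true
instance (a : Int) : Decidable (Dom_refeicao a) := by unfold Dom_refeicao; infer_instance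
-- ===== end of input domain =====

-- B replaces A's step-by-step counting loop with the closed form 10 - a % 10 (simpler).

-- ===== PORT A =====
-- A's while-loop: increment a and the counter until a % 10 == 0.  The Nat fuel
-- only makes the loop total: 10 steps always suffice (a % 10 ∈ [1,9] at entry
-- and reaches 0 after at most 9 increments), proved in refeicaoLoop_eq below.
def refeicaoLoop : Nat → Int → Int → Int
  | 0, _, receita => receita
  | fuel + 1, a, receita =>
    if PySem.Int.mod a 10 ≠ 0 then refeicaoLoop fuel (a + 1) (receita + 1)
    else receita

def refeicao (a : Int) : Int :=
  if PySem.Int.mod a 10 = 0 then 5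
  else refeicaoLoop 10 a 0

-- ===== PORT B =====
def refeicao_alt (a : Int) : Int :=
  if PySem.Int.mod a 10 = 0 then 5
  else 10 - PySem.Int.mod a 10

-- ===== PRECONDITION & SPEC =====
def Spec_refeicao (a : Int) (out : Int) : Prop := out = refeicao_alt a
instance (a : Int) (out : Int) : Decidable (Spec_refeicao a out) := by unfold Spec_refeicao; infer_instance

-- ===== CLAIM =====
def Claim_equal_refeicao : Prop := ∀ (a : Int), Dom_refeicao a → Spec_refeicao a (refeicao a)

-- ===== LEMMAS AND PROOFS =====
-- loop characterisation: with enough fuel the loop adds the distance to the next multiple of 10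
theorem refeicaoLoop_eq (fuel : Nat) (a receita : Int)
    (h : PySem.Int.mod a 10 ≠ 0) (hf : 10 - PySem.Int.mod a 10 ≤ (fuel : Int)) :
    refeicaoLoop fuel a receita = receita + (10 - PySem.Int.mod a 10) := by
  induction fuel generalizing a receita with
  | zero =>
    exfalso
    have := PySem.Int.mod_lt a (b := 10) (by norm_num)
    simp only [Nat.cast_zero] at hf
    omega
  | succ n ih =>
    rw [refeicaoLoop, if_pos h]
    have e1 := PySem.Int.mod_eq_emod_of_pos (a := a) (b := 10) (by norm_num)
    have e2 := PySem.Int.mod_eq_emod_of_pos (a := a + 1) (b := 10) (by norm_num)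
    by_cases h2 : PySem.Int.mod (a + 1) 10 = 0
    · -- a % 10 = 9, the loop exits after this step with receita + 1
      have h9 : PySem.Int.mod a 10 = 9 := by rw [e1]; rw [e1] at h; rw [e2] at h2; omega
      cases n with
      | zero => rw [refeicaoLoop]; rw [h9]; ring
      | succ m => rw [refeicaoLoop, if_neg (by simpa using h2)]; rw [h9]; ring
    · have h4 : PySem.Int.mod (a + 1) 10 = PySem.Int.mod a 10 + 1 := by
        rw [e1] at h ⊢; rw [e2] at h2 ⊢; omega
      rw [ih (a + 1) (receita + 1) h2 (by push_cast at hf ⊢; omega)]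
      rw [h4]; ring

theorem refeicao_spec : Claim_equal_refeicao := by
  intro a _
  unfold Spec_refeicao refeicao refeicao_alt
  split_ifs with h
  · rfl
  · have h1 := PySem.Int.mod_nonneg a (b := 10) (by norm_num)
    rw [refeicaoLoop_eq 10 a 0 h (by push_cast; omega)]
    ring
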